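-- pv_equiv track=rewrite | github.com/cocm1324/algo | leetcode/30day/w1_07.py | ce
-- ===== SOURCE A (Python) =====
-- def ce(arr):
-- 	counterSum = 0
-- 	counter = dict()
-- 	setConversion = set(arr)
-- 	for el in arr:
-- 		if (not(el + 1 in counter)):
-- 			counter[el + 1] = 1
-- 		else:
-- 			counter[el + 1] += 1
-- 	for el in setConversion:
-- 		if (el in counter):
-- 			counterSum += counter[el]
--
-- 	return counterSum
-- ===== SOURCE B (Python) =====
-- def ce(arr):
--     s = set(arr)
--     return sum(1 for x in arr if x + 1 in s)
-- ===== Notes on version B (the rewrite author's own statement) =====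
-- stated objective: simpler
-- what changed: Replaces A's counter dict plus a second loop over the distinct values by a single pass over arr counting elements x with x+1 in the set built once.
import Mathlib
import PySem

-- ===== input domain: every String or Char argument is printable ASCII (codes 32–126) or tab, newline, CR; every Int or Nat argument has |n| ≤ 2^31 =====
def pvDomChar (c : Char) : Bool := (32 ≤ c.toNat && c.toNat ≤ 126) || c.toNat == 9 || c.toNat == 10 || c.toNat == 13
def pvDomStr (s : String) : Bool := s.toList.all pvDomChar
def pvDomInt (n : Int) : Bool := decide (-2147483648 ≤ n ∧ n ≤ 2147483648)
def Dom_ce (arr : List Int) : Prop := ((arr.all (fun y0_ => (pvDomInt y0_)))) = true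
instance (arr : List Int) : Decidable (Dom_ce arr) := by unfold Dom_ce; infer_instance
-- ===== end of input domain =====

-- B replaces A's counter dict + second loop over the distinct values by one counting pass over arr.

-- ===== PORT A =====
def ce (arr : List Int) : Int :=
  let counter : PySem.Dict Int Int :=
    arr.foldl (fun d el =>
      if !(d.contains (el + 1)) then d.insert (el + 1) 1
      else d.insert (el + 1) (d.getD (el + 1) 0 + 1)) PySem.Dict.empty
  let setConversion : PySem.Set Int := PySem.Set.ofList arr
  -- Python iterates the set in hash order; the summed result does not depend on the order
  let counterSum : Int :=
    setConversion.foldl (fun s el =>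
      if counter.contains el then s + counter.getD el 0 else s) 0
  counterSum

-- ===== PORT B =====
def ce_alt (arr : List Int) : Int :=
  let s : PySem.Set Int := PySem.Set.ofList arr
  arr.foldl (fun acc x => if PySem.Set.contains s (x + 1) then acc + 1 else acc) 0

-- ===== PRECONDITION & SPEC =====
def Spec_ce (arr : List Int) (out : Int) : Prop := out = ce_alt arr
instance (arr : List Int) (out : Int) : Decidable (Spec_ce arr out) := by unfold Spec_ce; infer_instance

-- ===== CLAIM (what is proved, stated in full; the proofs are below) =====
def Claim_equal_ce : Prop := ∀ (arr : List Int), Dom_ce arr → Spec_ce arr (ce arr)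

-- ===== LEMMAS AND PROOFS =====

-- A's counter-building loop is exactly Counter(arr.map (·+1)).
lemma ce_counter_eq (arr : List Int) :
    arr.foldl (fun d el =>
      if !(d.contains (el + 1)) then d.insert (el + 1) 1
      else d.insert (el + 1) (d.getD (el + 1) 0 + 1)) PySem.Dict.empty
    = PySem.Dict.counter (arr.map (· + 1)) := by
  have h := PySem.List.foldl_congr_mem
    (l := arr) (init := (PySem.Dict.empty : PySem.Dict Int Int))
    (f := fun d el =>
      if !(d.contains (el + 1)) then d.insert (el + 1) 1
      else d.insert (el + 1) (d.getD (el + 1) 0 + 1))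
    (g := fun d el => d.insert (el + 1) (d.getD (el + 1) 0 + 1))
    (by
      intro d el _
      by_cases hc : d.contains (el + 1)
      · simp [hc]
      · simp only [Bool.not_eq_true] at hc
        simp [hc, PySem.Dict.getD_of_not_contains _ _ hc])
  rw [h, ← PySem.Dict.foldl_insert_getD_add_one_eq_counter, List.foldl_map]

-- Prepending y to the counted list adds 1 to the sum iff y ∈ S (S without duplicates).
lemma sum_count_cons (S : List Int) (hS : S.Nodup) (y : Int) (m : List Int) :
    (S.map (fun el => (((y :: m).count el : Nat) : Int))).sum
    = (S.map (fun el => ((m.count el : Nat) : Int))).sum + (if y ∈ S then 1 else 0) := by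
  induction S with
  | nil => simp
  | cons a S ihS =>
    have ha : a ∉ S := (List.nodup_cons.mp hS).1
    have ih := ihS (List.nodup_cons.mp hS).2
    by_cases hay : a = y
    · subst hay
      simp only [List.map_cons, List.sum_cons, List.count_cons_self, ih]
      simp [ha]
      ring
    · have hcnt : (((y :: m).count a : Nat) : Int) = ((m.count a : Nat) : Int) := by
        simp [Ne.symm hay]
      have hmem : (y ∈ a :: S) ↔ y ∈ S := by
        rw [List.mem_cons]
        exact or_iff_right (fun h => hay h.symm)
      simp only [List.map_cons, List.sum_cons, hcnt, ih, hmem]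
      split_ifs <;> ring

-- Σ over a Nodup list S of m.count el equals m.countP (· ∈ S).
lemma sum_count_eq_countP (S m : List Int) (hS : S.Nodup) :
    (S.map (fun el => ((m.count el : Nat) : Int))).sum = (m.countP (fun y => decide (y ∈ S)) : Int) := by
  induction m with
  | nil => simp
  | cons y m ih =>
    rw [sum_count_cons S hS y m, ih, List.countP_cons]
    by_cases hy : y ∈ S <;> simp [hy]

lemma ce_eq (arr : List Int) : ce arr = ce_alt arr := by
  unfold ce ce_alt
  dsimp only
  rw [ce_counter_eq]
  -- A's second loop: drop the contains test (count is 0 outside the keys), then sum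
  have h2 : (PySem.Set.ofList arr).foldl (fun s el =>
      if (PySem.Dict.counter (arr.map (· + 1))).contains el
      then s + (PySem.Dict.counter (arr.map (· + 1))).getD el 0 else s) 0
      = (PySem.Set.ofList arr).foldl
          (fun s el => s + (PySem.Dict.counter (arr.map (· + 1))).getD el 0) 0 := by
    apply PySem.List.foldl_congr_mem
    intro s el _
    by_cases hc : (PySem.Dict.counter (arr.map (· + 1))).contains el
    · simp [hc]
    · simp only [Bool.not_eq_true] at hc
      simp [hc, PySem.Dict.getD_of_not_contains _ _ hc]
  -- B's loop: reindex over arr.map (·+1), then it is a countP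
  have h3 := PySem.List.foldl_if_add_one
    (fun y => PySem.Set.contains (PySem.Set.ofList arr) y) (arr.map (· + 1)) 0
  rw [List.foldl_map] at h3
  rw [h2, PySem.List.foldl_add, h3]
  have hmap : (PySem.Set.ofList arr).map
        (fun el => (PySem.Dict.counter (arr.map (· + 1))).getD el 0)
      = (PySem.Set.ofList arr).map (fun el => (((arr.map (· + 1)).count el : Nat) : Int)) :=
    List.map_congr_left (fun el _ => PySem.Dict.getD_counter _ _)
  rw [hmap, sum_count_eq_countP _ _ (PySem.Set.nodup_ofList arr)]
  have hp : (fun y : Int => decide (y ∈ PySem.Set.ofList arr))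
      = (fun y : Int => PySem.Set.contains (PySem.Set.ofList arr) y) := by
    funext y
    simp [PySem.Set.contains]
  rw [hp]

-- ===== VERDICT (by name: the statement is the Claim_ definition above) =====
theorem ce_spec : Claim_equal_ce := by
  intro arr _
  unfold Spec_ce
  exact ce_eq arr
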